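-- pv_equiv track=rewrite | github.com/bvreede/zincfinger | prepdata.py | findiso
-- ===== SOURCE A (Python) =====
-- def findiso(fadict):
-- 	'''
-- 	A function used to collect the keys of the largest isoforms
-- 	per gene, given a dictionary of sequences.
-- 	'''
-- 	genes = [] # a list of all the genes present in this database
-- 	proteins = {} # a dictionary containing the geneID as key and the header of the longest isoform as value
-- 	for key in fadict:
-- 		try:
-- 			geneID,genename,protein = key.split('|')
-- 		except ValueError: #to prevent crash in case there are only two elements
-- 			continue
-- 		# check if there is already an isoform in the database
-- 		if geneID in genes:
-- 			# this gene already has an isoform in the database; check if the current isoform is longer.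
-- 			inDB_ID = proteins[geneID] # retrieve the header of the currently longest isoform for this gene
-- 			inDB_seq = fadict[inDB_ID] # retrieve the sequence for this isoform
-- 			cur_seq = fadict[key] # retrieve the sequence of the isoform currently being assessed
-- 			if len(inDB_seq) < len(cur_seq):
-- 				# the current isoform is longer; replace the entry in the database
-- 				proteins[geneID] = key
-- 		else:
-- 			# this gene is not yet present in the database. Enter it!
-- 			genes += [geneID]
-- 			proteins[geneID] = key
-- 	return proteins
-- ===== SOURCE B (Python) =====
-- def findiso(fadict):
--     '''
--     Collect the header of the longest isoform per gene: group the valid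
--     headers by geneID in one pass, then pick each group's longest sequence.
--     '''
--     groups = {}
--     for key in fadict:
--         try:
--             geneID, genename, protein = key.split('|')
--         except ValueError:  # skip headers that do not have exactly three fields
--             continue
--         groups.setdefault(geneID, []).append(key)
--     return {g: max(ks, key=lambda k: len(fadict[k])) for g, ks in groups.items()}
-- ===== Notes on version B (the rewrite author's own statement) =====
-- stated objective: simpler
-- what changed: A interleaves membership tracking with a running-max replacement inside one loop; B first groups the valid headers by geneID in one pass and then picks each group's first longest key with max(..., key=len), a group-then-reduce decomposition.
import Mathlib
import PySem

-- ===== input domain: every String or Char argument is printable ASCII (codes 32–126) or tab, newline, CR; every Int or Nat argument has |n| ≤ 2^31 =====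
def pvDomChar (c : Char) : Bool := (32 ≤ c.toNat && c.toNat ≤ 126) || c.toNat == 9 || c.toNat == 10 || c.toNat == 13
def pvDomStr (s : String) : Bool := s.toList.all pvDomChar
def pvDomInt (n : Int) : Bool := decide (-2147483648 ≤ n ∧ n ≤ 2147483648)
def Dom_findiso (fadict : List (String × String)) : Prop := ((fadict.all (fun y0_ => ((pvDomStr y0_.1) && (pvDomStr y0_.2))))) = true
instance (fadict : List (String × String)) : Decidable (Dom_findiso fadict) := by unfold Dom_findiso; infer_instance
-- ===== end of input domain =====

-- B replaces A's interleaved running-max update with a group-then-reduce decomposition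
-- (one grouping pass, then a per-gene max); objective: simpler.

-- `geneID,genename,protein = key.split('|')` guarded by `except ValueError: continue`:
-- some geneID exactly when the split has exactly three fields (shared by both ports).
def splitKey (key : String) : Option String :=
  match PySem.Str.split? key "|" with
  | some [geneID, _genename, _protein] => some geneID
  | _ => none

-- `len(fadict[k])` where k is a key of fadict (first-match association-list lookup).
def seqLen (fadict : List (String × String)) (k : String) : Int :=
  PySem.Str.len ((PySem.Dict.mk fadict).getD k "")

-- ===== PORT A =====
-- loop body of A: state = (genes, proteins)
def stepA (fadict : List (String × String))
    (st : List String × PySem.Dict String String) (key : String) :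
    List String × PySem.Dict String String :=
  match splitKey key with
  | none => st
  | some geneID =>
    if geneID ∈ st.1 then
      -- inDB_ID = proteins[geneID]; compare len(fadict[inDB_ID]) < len(fadict[key])
      if seqLen fadict (st.2.getD geneID "") < seqLen fadict key then
        (st.1, st.2.insert geneID key)
      else st
    else (st.1 ++ [geneID], st.2.insert geneID key)

def findiso (fadict : List (String × String)) : List (String × String) :=
  (List.foldl (stepA fadict) ([], PySem.Dict.empty) (fadict.map Prod.fst)).2.items

-- ===== PORT B =====
-- grouping pass: groups.setdefault(geneID, []).append(key)
def stepB (groups : PySem.Dict String (List String)) (key : String) :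
    PySem.Dict String (List String) :=
  match splitKey key with
  | none => groups
  | some geneID => groups.modify geneID [] (· ++ [key])

-- {g: max(ks, key=lambda k: len(fadict[k])) ...} — Python max returns the FIRST maximum
def pickLongest (fadict : List (String × String)) (p : String × List String) :
    String × String :=
  (p.1, (PySem.List.max? p.2 (seqLen fadict)).getD "")

def findiso_alt (fadict : List (String × String)) : List (String × String) :=
  let groups := List.foldl stepB PySem.Dict.empty (fadict.map Prod.fst)
  groups.items.map (pickLongest fadict)

-- ===== PRECONDITION & SPEC =====
def Spec_findiso (fadict : List (String × String)) (out : List (String × String)) : Prop := out = findiso_alt fadict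
instance (fadict : List (String × String)) (out : List (String × String)) : Decidable (Spec_findiso fadict out) := by unfold Spec_findiso; infer_instance

-- ===== CLAIM (what is proved, stated in full; the proofs are below) =====
def Claim_equal_findiso : Prop := ∀ (fadict : List (String × String)), Dom_findiso fadict → Spec_findiso fadict (findiso fadict)

-- ===== LEMMAS AND PROOFS =====

-- Python's max over a list extended by one element: keep the old first-maximum
-- unless the new element is strictly larger under the key.
theorem max?_append_one {α κ : Type} [LT κ] [DecidableLT κ] (l : List α) (x : α) (f : α → κ) :
    PySem.List.max? (l ++ [x]) f =
      some (match PySem.List.max? l f with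
            | none => x
            | some m => if f m < f x then x else m) := by
  have h : PySem.List.max? (l ++ [x]) f =
      (match PySem.List.max? l f with
       | none => some x
       | some m => if f m < f x then some x else some m) := by
    simp only [PySem.List.max?, List.foldl_append, List.foldl_cons, List.foldl_nil]
    rfl
  rw [h]
  cases PySem.List.max? l f with
  | none => rfl
  | some m => by_cases hc : f m < f x <;> simp [hc]

-- the loop invariant tying A's state (genes, proteins) to B's groups
def LoopInv (fadict : List (String × String)) (st : List String × PySem.Dict String String)
    (grp : PySem.Dict String (List String)) : Prop :=
  st.1 = grp.keys ∧ grp.keys.Nodup ∧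
  st.2.items = grp.items.map (pickLongest fadict) ∧
  ∀ p ∈ grp.items, p.2 ≠ []

theorem inv_keys_eq (fadict : List (String × String)) (st : List String × PySem.Dict String String)
    (grp : PySem.Dict String (List String)) (h : LoopInv fadict st grp) :
    st.2.keys = grp.keys := by
  obtain ⟨-, -, h3, -⟩ := h
  simp only [PySem.Dict.keys, h3, List.map_map]
  rfl

theorem inv_step (fadict : List (String × String)) (key : String)
    (st : List String × PySem.Dict String String) (grp : PySem.Dict String (List String))
    (h : LoopInv fadict st grp) : LoopInv fadict (stepA fadict st key) (stepB grp key) := by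
  obtain ⟨h1, h2, h3, h4⟩ := h
  have hkeys := inv_keys_eq fadict st grp ⟨h1, h2, h3, h4⟩
  unfold stepA stepB
  cases hsplit : splitKey key with
  | none => exact ⟨h1, h2, h3, h4⟩
  | some g =>
    simp only [PySem.Dict.modify]
    by_cases hg : g ∈ st.1
    · -- gene already present: B appends key to its group, A replaces iff strictly longer
      have hgk : g ∈ grp.keys := h1 ▸ hg
      have hc : grp.contains g = true := (PySem.Dict.contains_iff_mem_keys grp g).2 hgk
      have hcP : st.2.contains g = true := by
        rw [PySem.Dict.contains_iff_mem_keys, hkeys]; exact hgk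
      have hkeys' : (grp.insert g (grp.getD g [] ++ [key])).keys = grp.keys :=
        PySem.Dict.keys_insert_of_contains grp _ hc
      -- the unique group of g
      obtain ⟨l, hl⟩ : ∃ l, (g, l) ∈ grp.items := by
        simp only [PySem.Dict.keys] at hgk
        obtain ⟨p, hp, hp1⟩ := List.mem_map.1 hgk
        exact ⟨p.2, by rwa [show (g, p.2) = p from by rw [← hp1]]⟩
      have hlD : grp.getD g [] = l := PySem.Dict.getD_of_mem_items grp hl h2 []
      have hlne : l ≠ [] := h4 _ hl
      -- proteins[g] is the first maximum of l
      have hPnd : st.2.keys.Nodup := hkeys ▸ h2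
      have hPg : st.2.getD g "" = (PySem.List.max? l (seqLen fadict)).getD "" := by
        have : (g, (pickLongest fadict (g, l)).2) ∈ st.2.items := by
          rw [h3]
          exact List.mem_map.2 ⟨(g, l), hl, rfl⟩
        exact PySem.Dict.getD_of_mem_items st.2 this hPnd ""
      obtain ⟨m, hm⟩ : ∃ m, PySem.List.max? l (seqLen fadict) = some m := by
        cases hml : PySem.List.max? l (seqLen fadict) with
        | none => exact absurd ((PySem.List.max?_eq_none_iff l (seqLen fadict)).1 hml) hlne
        | some m => exact ⟨m, rfl⟩
      have hPm : st.2.getD g "" = m := by rw [hPg, hm]; rfl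
      -- reduce of the appended group
      have hred : pickLongest fadict (g, l ++ [key]) =
          (g, if seqLen fadict m < seqLen fadict key then key else m) := by
        simp [pickLongest, max?_append_one, hm]
      -- item lists after the step
      have hitems : (grp.insert g (grp.getD g [] ++ [key])).items.map (pickLongest fadict)
          = grp.items.map (fun p =>
              if p.1 == g then (g, if seqLen fadict m < seqLen fadict key then key else m)
              else pickLongest fadict p) := by
        rw [PySem.Dict.items_insert_of_contains grp _ hc, List.map_map]
        refine List.map_congr_left (fun p hp => ?_)
        by_cases hpg : p.1 == g
        · have : p.2 = l := by
            have h1' := PySem.Dict.get?_of_mem_items grp hp h2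
            have h2' := PySem.Dict.get?_of_mem_items grp hl h2
            have : grp.get? g = some p.2 := by rwa [← (beq_iff_eq.1 hpg)]
            rw [h2'] at this; exact (Option.some_inj.1 this).symm
          simp [Function.comp, hpg, hlD, hred]
        · simp only [Function.comp, hpg]
          simp at hpg
          simp
      split_ifs with hlt
      · -- strictly longer: A inserts key at g
        refine ⟨by simpa [hkeys'] using h1, by simpa [hkeys'] using h2, ?_, ?_⟩
        · rw [PySem.Dict.items_insert_of_contains st.2 _ hcP, h3, List.map_map, hitems]
          refine List.map_congr_left (fun p hp => ?_)
          by_cases hpg : p.1 == g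
          · simp [Function.comp, pickLongest, hpg, if_pos (hPm ▸ hlt)]
          · simp [Function.comp, pickLongest, hpg]
        · intro p hp
          rcases (PySem.Dict.mem_items_insert _ _ _ _).1 hp with hpe | ⟨hpm, -⟩
          · subst hpe; simp [hlD]
          · exact h4 _ hpm
      · -- not longer: A keeps proteins unchanged; the reduced item is still m
        refine ⟨by simpa [hkeys'] using h1, by simpa [hkeys'] using h2, ?_, ?_⟩
        · rw [h3, hitems]
          refine (List.map_congr_left (fun p hp => ?_)).symm
          by_cases hpg : p.1 == g
          · have hp2 : p.2 = l := by
              have h1' := PySem.Dict.get?_of_mem_items grp hp h2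
              have h2' := PySem.Dict.get?_of_mem_items grp hl h2
              have : grp.get? g = some p.2 := by rwa [← (beq_iff_eq.1 hpg)]
              rw [h2'] at this; exact (Option.some_inj.1 this).symm
            have hnl : ¬ seqLen fadict m < seqLen fadict key := hPm ▸ hlt
            simp [if_neg hnl, pickLongest, hp2, beq_iff_eq.1 hpg, hm]
          · simp [hpg]
        · intro p hp
          rcases (PySem.Dict.mem_items_insert _ _ _ _).1 hp with hpe | ⟨hpm, -⟩
          · subst hpe; simp [hlD]
          · exact h4 _ hpm
    · -- new gene: both append a fresh entry
      have hgk : g ∉ grp.keys := h1 ▸ hg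
      have hc : grp.contains g = false := by
        rw [← Bool.not_eq_true, PySem.Dict.contains_iff_mem_keys]; exact hgk
      have hcP : st.2.contains g = false := by
        rw [← Bool.not_eq_true, PySem.Dict.contains_iff_mem_keys, hkeys]; exact hgk
      have hD : grp.getD g [] = [] := PySem.Dict.getD_of_not_contains grp [] hc
      rw [if_neg hg]
      refine ⟨?_, ?_, ?_, ?_⟩
      · rw [PySem.Dict.keys_insert_of_not_contains grp _ hc, h1]
      · rw [PySem.Dict.keys_insert_of_not_contains grp _ hc]
        exact h2.append (List.nodup_singleton g) (by simpa [List.disjoint_singleton] using hgk)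
      · rw [PySem.Dict.items_insert_of_not_contains st.2 _ hcP,
            PySem.Dict.items_insert_of_not_contains grp _ hc, List.map_append, h3, hD]
        simp [pickLongest, PySem.List.max?]
      · intro p hp
        rw [PySem.Dict.items_insert_of_not_contains grp _ hc] at hp
        rcases List.mem_append.1 hp with hpm | hpe
        · exact h4 _ hpm
        · simp at hpe; simp [hpe, hD]

theorem inv_foldl (fadict : List (String × String)) (ks : List String)
    (st : List String × PySem.Dict String String) (grp : PySem.Dict String (List String))
    (h : LoopInv fadict st grp) :
    LoopInv fadict (List.foldl (stepA fadict) st ks) (List.foldl stepB grp ks) := by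
  induction ks generalizing st grp with
  | nil => exact h
  | cons k ks ih => exact ih _ _ (inv_step fadict k st grp h)

-- ===== VERDICT (by name: the statement is the Claim_ definition above) =====
theorem findiso_spec : Claim_equal_findiso := by
  intro fadict _
  have h := inv_foldl fadict (fadict.map Prod.fst) ([], PySem.Dict.empty) PySem.Dict.empty
    ⟨by simp [PySem.Dict.keys, PySem.Dict.empty], by simp [PySem.Dict.keys, PySem.Dict.empty],
     by simp [PySem.Dict.empty], by simp [PySem.Dict.empty]⟩
  unfold Spec_findiso findiso findiso_alt
  exact h.2.2.1
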